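-- pv_equiv track=rewrite | github.com/RenTonoduka/supermovie | template/scripts/build_telop_data.py | _is_inside_preserve
-- ===== SOURCE A (Python) =====
-- def _is_inside_preserve(text: str, i: int, preserve: list[str]) -> bool:
--     for p in preserve:
--         if not p:
--             continue
--         start = 0
--         while True:
--             idx = text.find(p, start)
--             if idx < 0:
--                 break
--             end = idx + len(p)
--             if idx < i < end:
--                 return True
--             start = idx + 1
--     return False
-- ===== SOURCE B (Python) =====
-- def _is_inside_preserve(text: str, i: int, preserve: list[str]) -> bool:
--     # Only positions idx with idx < i < idx+len(p) can matter, so test just that window.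
--     n = len(text)
--     for p in preserve:
--         if not p:
--             continue
--         lo = max(0, i - len(p) + 1)
--         hi = min(i, n - len(p) + 1)
--         for idx in range(lo, hi):
--             if text[idx:idx + len(p)] == p:
--                 return True
--     return False
-- ===== Notes on version B (the rewrite author's own statement) =====
-- stated objective: faster
-- what changed: Instead of enumerating every occurrence of each preserve string across the whole text via repeated str.find, B checks only the O(len(p)) candidate start positions idx in [max(0,i-len(p)+1), min(i, len(text)-len(p)+1)) whose occurrence could strictly contain index i, comparing text[idx:idx+len(p)] to p.
import Mathlib
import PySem

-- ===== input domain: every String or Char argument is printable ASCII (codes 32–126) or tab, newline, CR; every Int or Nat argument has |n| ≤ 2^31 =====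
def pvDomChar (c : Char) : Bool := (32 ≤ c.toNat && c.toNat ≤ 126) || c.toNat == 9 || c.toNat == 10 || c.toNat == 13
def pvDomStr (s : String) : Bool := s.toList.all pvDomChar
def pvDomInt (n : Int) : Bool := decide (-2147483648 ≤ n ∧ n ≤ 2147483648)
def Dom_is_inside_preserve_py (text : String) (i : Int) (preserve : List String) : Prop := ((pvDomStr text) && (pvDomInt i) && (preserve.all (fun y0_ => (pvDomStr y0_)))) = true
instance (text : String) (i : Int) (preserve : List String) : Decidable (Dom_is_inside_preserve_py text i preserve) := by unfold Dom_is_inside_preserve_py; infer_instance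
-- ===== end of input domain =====

-- B checks only the candidate start positions whose occurrence could contain i,
-- instead of enumerating every occurrence of each preserve string via repeated find.

-- ===== PORT A =====
-- the 'while True' loop of A: start = current search start; fuel makes it total
-- (fuel ≥ text.length + 1 - start suffices, proved in the lemmas below)
def pvALoop (text p : String) (i : Int) : Nat → Int → Bool
  | 0, _ => false
  | fuel + 1, start =>
      let idx := PySem.Str.findFrom text p start none
      if idx < 0 then false
      else
        let «end» := idx + (p.length : Int)
        if idx < i ∧ i < «end» then true
        else pvALoop text p i fuel (idx + 1)

def is_inside_preserve_py (text : String) (i : Int) (preserve : List String) : Bool :=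
  preserve.any (fun p =>
    if p.length = 0 then false
    else pvALoop text p i (text.length + 1) 0)

-- ===== PORT B =====
def is_inside_preserve_py_alt (text : String) (i : Int) (preserve : List String) : Bool :=
  let n : Int := text.length
  preserve.any (fun p =>
    if p.length = 0 then false
    else
      let lo : Int := max 0 (i - p.length + 1)
      let hi : Int := min i (n - p.length + 1)
      (PySem.List.pyRange lo hi 1).any (fun idx =>
        PySem.Str.slice text (some idx) (some (idx + p.length)) == p))

-- ===== PRECONDITION & SPEC =====
def Spec_is_inside_preserve_py (text : String) (i : Int) (preserve : List String) (out : Bool) : Prop := out = is_inside_preserve_py_alt text i preserve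
instance (text : String) (i : Int) (preserve : List String) (out : Bool) : Decidable (Spec_is_inside_preserve_py text i preserve out) := by unfold Spec_is_inside_preserve_py; infer_instance

-- ===== CLAIM (what is proved, stated in full; the proofs are below) =====
def Claim_equal_is_inside_preserve_py : Prop := ∀ (text : String) (i : Int) (preserve : List String), Dom_is_inside_preserve_py text i preserve → Spec_is_inside_preserve_py text i preserve (is_inside_preserve_py text i preserve)

-- ===== LEMMAS AND PROOFS =====

theorem pvALoop_true_iff (text p : String) (i : Int) (hp : p.length ≠ 0) :
    ∀ (fuel : Nat) (start : Nat), start ≤ text.length →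
    text.length + 1 ≤ start + fuel →
    (pvALoop text p i fuel (start : Int) = true ↔
      ∃ j : Nat, start ≤ j ∧ p.toList <+: text.toList.drop j ∧
        (j : Int) < i ∧ i < (j : Int) + p.length) := by
  have hplen : p.toList.length = p.length := by simp
  have htlen : text.toList.length = text.length := by simp
  intro fuel
  induction fuel with
  | zero => intro start hs hf; exact absurd hf (by omega)
  | succ fuel ih =>
    intro start hs hf
    have hs' : start ≤ text.toList.length := by omega
    rw [pvALoop]
    simp only [PySem.Str.findFrom_eq]
    by_cases hneg : PySem.Chars.findFrom text.toList p.toList (start : Int) none < 0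
    · have hm1 : PySem.Chars.findFrom text.toList p.toList (start : Int) none = -1 := by
        by_contra h
        have := (PySem.Chars.findFrom_natCast_spec text.toList p.toList start hs' h).1
        omega
      have hni := (PySem.Chars.findFrom_natCast_eq_neg_one_iff text.toList p.toList start hs').mp hm1
      simp only [if_pos hneg, Bool.false_eq_true, false_iff]
      rintro ⟨j, hj, hpre, -, -⟩
      apply hni
      rw [← PySem.Chars.isIn_iff_infix]
      rw [← PySem.Chars.exists_prefix_drop_iff_isIn]
      refine ⟨j - start, ?_⟩
      rw [List.drop_drop]
      have hsj : start + (j - start) = j := by omega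
      rw [hsj]; exact hpre
    · obtain ⟨hge, hpref, hmin⟩ :=
        PySem.Chars.findFrom_natCast_spec text.toList p.toList start hs' (by omega)
      set f := PySem.Chars.findFrom text.toList p.toList (start : Int) none with hfdef
      have hf0 : 0 ≤ f := by omega
      have hfnat : ((f.toNat : Nat) : Int) = f := Int.toNat_of_nonneg hf0
      have hjlen : f.toNat + p.length ≤ text.length := by
        have h1 := hpref.length_le
        rw [List.length_drop] at h1
        omega
      by_cases hc : f < i ∧ i < f + (p.length : Int)
      · simp only [if_neg hneg, if_pos hc, true_iff]
        exact ⟨f.toNat, by omega, hpref, by rw [hfnat]; exact hc.1, by rw [hfnat]; exact hc.2⟩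
      · simp only [if_neg hneg, if_neg hc]
        have hcast : f + 1 = (((f.toNat + 1 : Nat)) : Int) := by omega
        rw [hcast, ih (f.toNat + 1) (by omega) (by omega)]
        constructor
        · rintro ⟨j, hj, rest⟩; exact ⟨j, by omega, rest⟩
        · rintro ⟨j, hj, hpre, h2, h3⟩
          refine ⟨j, ?_, hpre, h2, h3⟩
          rcases Nat.lt_or_ge j f.toNat with hlt | hge2
          · exact absurd hpre (hmin j hj hlt)
          · rcases Nat.eq_or_lt_of_le hge2 with heq | hlt2
            · exfalso; apply hc; constructor <;> [skip; skip] <;>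
                · rw [← hfnat, heq]; first | exact h2 | exact h3
            · omega

theorem pvBInner_true_iff (text p : String) (i : Int) :
    ((PySem.List.pyRange (max 0 (i - p.length + 1)) (min i ((text.length : Int) - p.length + 1)) 1).any
      (fun idx => PySem.Str.slice text (some idx) (some (idx + p.length)) == p)) = true ↔
      ∃ j : Nat, p.toList <+: text.toList.drop j ∧ (j : Int) < i ∧ i < (j : Int) + p.length := by
  have hplen : p.toList.length = p.length := by simp
  have htlen : text.toList.length = text.length := by simp
  simp only [List.any_eq_true]
  constructor
  · rintro ⟨idx, hmem, heq⟩
    rw [PySem.List.mem_pyRange_one] at hmem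
    obtain ⟨hlo, hhi⟩ := hmem
    have h0 : (0 : Int) ≤ idx := le_trans (le_max_left _ _) hlo
    have hidx : ((idx.toNat : Nat) : Int) = idx := Int.toNat_of_nonneg h0
    have heq' : (PySem.Str.slice text (some idx) (some (idx + p.length))).toList = p.toList := by
      rw [beq_iff_eq.mp heq]
    rw [PySem.Str.toList_slice, PySem.Chars.slice_eq_listSlice, ← hidx,
      PySem.List.slice_natCast_add] at heq'
    refine ⟨idx.toNat, ?_, by omega, ?_⟩
    · rw [List.prefix_iff_eq_take, hplen]
      exact heq'.symm
    · have : i - p.length + 1 ≤ idx := le_trans (le_max_right _ _) hlo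
      omega
  · rintro ⟨j, hpre, h2, h3⟩
    have hjlen : j + p.length ≤ text.length := by
      have h1 := hpre.length_le
      rw [List.length_drop] at h1
      omega
    refine ⟨(j : Int), ?_, ?_⟩
    · rw [PySem.List.mem_pyRange_one]
      constructor
      · apply max_le (by omega) (by omega)
      · exact lt_min (by omega) (by omega)
    · have htake : List.take p.length (List.drop j text.toList) = p.toList := by
        rw [List.prefix_iff_eq_take, hplen] at hpre
        exact hpre.symm
      have : (PySem.Str.slice text (some (j : Int)) (some ((j : Int) + p.length))).toList = p.toList := by
        rw [PySem.Str.toList_slice, PySem.Chars.slice_eq_listSlice,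
          PySem.List.slice_natCast_add, htake]
      exact beq_iff_eq.mpr (String.toList_inj.mp this)

-- ===== VERDICT (by name: the statement is the Claim_ definition above) =====
theorem is_inside_preserve_py_spec : Claim_equal_is_inside_preserve_py := by
  intro text i preserve _
  unfold Spec_is_inside_preserve_py
  unfold is_inside_preserve_py is_inside_preserve_py_alt
  refine congrArg preserve.any (funext fun p => ?_)
  by_cases h0 : p.length = 0
  · simp [h0]
  · simp only [if_neg h0]
    rw [Bool.eq_iff_iff]
    rw [show ((0:Int) = ((0:Nat):Int)) from rfl, pvALoop_true_iff text p i h0 (text.length + 1) 0 (Nat.zero_le _) (by omega)]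
    simp only [Nat.cast_zero]
    rw [pvBInner_true_iff text p i]
    constructor
    · rintro ⟨j, _, h1, h2, h3⟩; exact ⟨j, h1, h2, h3⟩
    · rintro ⟨j, h1, h2, h3⟩; exact ⟨j, Nat.zero_le _, h1, h2, h3⟩
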